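-- pv_equiv track=rewrite | github.com/IncOQ/incoq | invinc/tests/programs/test_transformation.py | get_test_entries
-- ===== SOURCE A (Python) =====
-- def get_test_entries(dirfiles):
--     """Given a list of pairs of directories and files, return a set of
--     tuples (dir, base_name, in_name, outpy_name, outtxt_name)
--     representing a group of test files. base_name is the common prefix
--     to the three other files. An entry is returned iff the in_name file
--     actually exists. If the other two files do not exist, None is
--     substituted.
--     """
--     test_entries = set()
--     for dir, filenames in dirfiles:
--         for name in filenames:
--             if name.endswith('_in.py'):
--                 base_name = name[:-len('_in.py')]
--                 in_name = name
--                 outpy_name = base_name + '_out.py'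
--                 outtxt_name = base_name + '_out.txt'
--                 if outpy_name not in filenames:
--                     outpy_name = None
--                 if outtxt_name not in filenames:
--                     outtxt_name = None
--
--                 test_entries.add((dir, base_name, in_name,
--                                   outpy_name, outtxt_name))
--
--     return test_entries
-- ===== SOURCE B (Python) =====
-- def get_test_entries(dirfiles):
--     """One classification pass per directory: bucket each filename by its
--     suffix into three base-name sets, then emit one entry per '_in.py' base."""
--     result = set()
--     for dir, filenames in dirfiles:
--         ins = set()
--         outpys = set()
--         outtxts = set()
--         for name in filenames:
--             if name.endswith('_in.py'):
--                 ins.add(name[:-6])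
--             elif name.endswith('_out.py'):
--                 outpys.add(name[:-7])
--             elif name.endswith('_out.txt'):
--                 outtxts.add(name[:-8])
--         for base in ins:
--             result.add((dir, base, base + '_in.py',
--                         base + '_out.py' if base in outpys else None,
--                         base + '_out.txt' if base in outtxts else None))
--     return result
-- ===== Notes on version B (the rewrite author's own statement) =====
-- stated objective: alternative
-- what changed: B replaces A's per-'_in.py'-file membership rescans of the whole filename list by one classification pass per directory that buckets filenames into three base-name sets, then emits one entry per collected in-base; it trades A's repeated list scans for an index-then-emit pass of similar measured cost.
import Mathlib
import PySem

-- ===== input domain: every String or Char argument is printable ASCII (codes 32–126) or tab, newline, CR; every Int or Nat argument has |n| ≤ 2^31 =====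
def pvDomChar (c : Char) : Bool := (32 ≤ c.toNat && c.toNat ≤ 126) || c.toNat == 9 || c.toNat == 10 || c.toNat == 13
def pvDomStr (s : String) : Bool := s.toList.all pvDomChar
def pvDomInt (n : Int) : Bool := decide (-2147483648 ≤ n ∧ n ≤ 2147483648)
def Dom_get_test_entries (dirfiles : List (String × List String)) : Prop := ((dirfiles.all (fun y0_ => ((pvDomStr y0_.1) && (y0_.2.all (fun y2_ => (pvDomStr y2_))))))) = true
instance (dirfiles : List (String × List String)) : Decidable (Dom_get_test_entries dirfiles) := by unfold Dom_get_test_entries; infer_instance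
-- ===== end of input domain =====

-- B replaces A's per-'_in.py'-file rescans of the filename list by one classification
-- pass per directory into three base-name sets, then emits from the '_in.py' set.

-- ===== PORT A =====
def get_test_entries (dirfiles : List (String × List String)) : List (String × String × String × Option String × Option String) :=
  dirfiles.foldl (fun test_entries df =>
    df.2.foldl (fun test_entries name =>
      if PySem.Str.endswith name "_in.py" then
        let base_name := PySem.Str.slice name none (some (-6))
        let in_name := name
        let outpy_name := base_name ++ "_out.py"
        let outtxt_name := base_name ++ "_out.txt"
        let outpy? : Option String := if df.2.contains outpy_name then some outpy_name else none
        let outtxt? : Option String := if df.2.contains outtxt_name then some outtxt_name else none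
        PySem.Set.add test_entries (df.1, base_name, in_name, outpy?, outtxt?)
      else test_entries) test_entries) PySem.Set.empty

-- ===== PORT B =====
def get_test_entries_alt (dirfiles : List (String × List String)) : List (String × String × String × Option String × Option String) :=
  dirfiles.foldl (fun result df =>
    let c := df.2.foldl
      (fun (acc : PySem.Set String × PySem.Set String × PySem.Set String) name =>
        if PySem.Str.endswith name "_in.py" then
          (PySem.Set.add acc.1 (PySem.Str.slice name none (some (-6))), acc.2.1, acc.2.2)
        else if PySem.Str.endswith name "_out.py" then
          (acc.1, PySem.Set.add acc.2.1 (PySem.Str.slice name none (some (-7))), acc.2.2)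
        else if PySem.Str.endswith name "_out.txt" then
          (acc.1, acc.2.1, PySem.Set.add acc.2.2 (PySem.Str.slice name none (some (-8))))
        else acc)
      (PySem.Set.empty, PySem.Set.empty, PySem.Set.empty)
    c.1.foldl (fun result base =>
      PySem.Set.add result (df.1, base, base ++ "_in.py",
        if PySem.Set.contains c.2.1 base then some (base ++ "_out.py") else none,
        if PySem.Set.contains c.2.2 base then some (base ++ "_out.txt") else none)) result)
    PySem.Set.empty

-- ===== PRECONDITION & SPEC =====
def Spec_get_test_entries (dirfiles : List (String × List String)) (out : List (String × String × String × Option String × Option String)) : Prop := out = get_test_entries_alt dirfiles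
instance (dirfiles : List (String × List String)) (out : List (String × String × String × Option String × Option String)) : Decidable (Spec_get_test_entries dirfiles out) := by unfold Spec_get_test_entries; infer_instance

-- ===== CLAIM (what is proved, stated in full; the proofs are below) =====
def Claim_equal_get_test_entries : Prop := ∀ (dirfiles : List (String × List String)), Dom_get_test_entries dirfiles → Spec_get_test_entries dirfiles (get_test_entries dirfiles)


-- ===== LEMMAS AND PROOFS =====

-- proof-side abbreviations
def pvG (dir : String) (fns : List String) (b : String) :
    String × String × String × Option String × Option String :=
  (dir, b, b ++ "_in.py",
   if fns.contains (b ++ "_out.py") then some (b ++ "_out.py") else none,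
   if fns.contains (b ++ "_out.txt") then some (b ++ "_out.txt") else none)

def pvInBases (l : List String) : List String :=
  l.filterMap (fun n => if PySem.Str.endswith n "_in.py" then some (PySem.Str.slice n none (some (-6))) else none)

def pvOpBases (l : List String) : List String :=
  l.filterMap (fun n => if PySem.Str.endswith n "_in.py" then none
    else if PySem.Str.endswith n "_out.py" then some (PySem.Str.slice n none (some (-7))) else none)

def pvOtBases (l : List String) : List String :=
  l.filterMap (fun n => if PySem.Str.endswith n "_in.py" then none
    else if PySem.Str.endswith n "_out.py" then none
    else if PySem.Str.endswith n "_out.txt" then some (PySem.Str.slice n none (some (-8))) else none)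

-- ---- string lemmas ----

theorem pv_strip {n suf : String} {k : Nat} {ki : Int} (hki : ki = -(k : Int))
    (hk : suf.toList.length = k) (h1k : 1 < k)
    (h : PySem.Str.endswith n suf = true) :
    PySem.Str.slice n none (some ki) ++ suf = n := by
  rw [hki]
  rw [PySem.Str.endswith_eq, PySem.Chars.endswith_iff] at h
  obtain ⟨t, ht⟩ := h
  apply String.toList_inj.mp
  rw [String.toList_append, PySem.Str.toList_slice, PySem.Chars.slice_eq_listSlice]
  have hcast : -(k : Int) = -(OfNat.ofNat k) := rfl
  rw [hcast, PySem.List.slice_to_neg_ofNat _ k h1k, ← ht]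
  simp [hk]

theorem pv_base_append (b : String) {suf : String} {k : Nat} {ki : Int} (hki : ki = -(k : Int))
    (hk : suf.toList.length = k) (h1k : 1 < k) :
    PySem.Str.slice (b ++ suf) none (some ki) = b := by
  rw [hki]
  apply String.toList_inj.mp
  rw [PySem.Str.toList_slice, PySem.Chars.slice_eq_listSlice]
  have hcast : -(k : Int) = -(OfNat.ofNat k) := rfl
  rw [hcast, PySem.List.slice_to_neg_ofNat _ k h1k]
  rw [String.toList_append]
  simp [hk]

theorem pv_endswith_append (b suf : String) : PySem.Str.endswith (b ++ suf) suf = true := by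
  rw [PySem.Str.endswith_eq, PySem.Chars.endswith_iff, String.toList_append]
  exact List.suffix_append _ _

theorem pv_not_endswith (b : String) {suf1 suf2 : String}
    (hlen : suf1.toList.length ≤ suf2.toList.length)
    (hns : ¬ suf1.toList <:+ suf2.toList) :
    PySem.Str.endswith (b ++ suf2) suf1 = false := by
  by_contra h
  rw [Bool.not_eq_false, PySem.Str.endswith_eq, PySem.Chars.endswith_iff,
    String.toList_append] at h
  exact hns (List.suffix_of_suffix_length_le h (List.suffix_append _ _) hlen)

-- ---- generic Set.add fold lemmas ----

theorem pv_add_of_mem {α : Type} [BEq α] [LawfulBEq α] {s : PySem.Set α} {x : α}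
    (h : x ∈ s) : PySem.Set.add s x = s := by
  simp [PySem.Set.add, h]

theorem pv_mem_foldl_left {α : Type} [BEq α] [LawfulBEq α] {x : α} {s : PySem.Set α}
    (l : List α) (h : x ∈ s) : x ∈ List.foldl PySem.Set.add s l := by
  induction l generalizing s with
  | nil => exact h
  | cons y l ih => exact ih ((PySem.Set.mem_add s y x).mpr (Or.inl h))

theorem pv_mem_foldl_of_mem {α : Type} [BEq α] [LawfulBEq α] {x : α} {u : List α}
    (s : PySem.Set α) (h : x ∈ u) : x ∈ List.foldl PySem.Set.add s u := by
  induction u generalizing s with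
  | nil => cases h
  | cons y u ih =>
    rcases List.mem_cons.mp h with h | h
    · exact pv_mem_foldl_left u ((PySem.Set.mem_add s y x).mpr (Or.inr h))
    · exact ih _ h

theorem pv_foldl_add_add {α : Type} [BEq α] [LawfulBEq α] (s u : PySem.Set α) (x : α) :
    List.foldl PySem.Set.add s (PySem.Set.add u x)
      = PySem.Set.add (List.foldl PySem.Set.add s u) x := by
  by_cases h : x ∈ u
  · rw [pv_add_of_mem h, pv_add_of_mem (pv_mem_foldl_of_mem s h)]
  · have : PySem.Set.add u x = u ++ [x] := by
      unfold PySem.Set.add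
      rw [if_neg (by simpa using h)]
    rw [this, List.foldl_append]
    rfl

theorem pv_foldl_foldl {α : Type} [BEq α] [LawfulBEq α] (l : List α) (s u : PySem.Set α) :
    List.foldl PySem.Set.add s (List.foldl PySem.Set.add u l)
      = List.foldl PySem.Set.add (List.foldl PySem.Set.add s u) l := by
  induction l generalizing u with
  | nil => rfl
  | cons x l ih =>
    show List.foldl PySem.Set.add s (List.foldl PySem.Set.add (PySem.Set.add u x) l) = _
    rw [ih (PySem.Set.add u x), pv_foldl_add_add]
    rfl

theorem pv_foldl_ofList {α : Type} [BEq α] [LawfulBEq α] (l : List α) (s : PySem.Set α) :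
    List.foldl PySem.Set.add s (PySem.Set.ofList l) = List.foldl PySem.Set.add s l := by
  rw [PySem.Set.ofList_eq_foldl]
  have := pv_foldl_foldl l s []
  simpa using this

theorem pv_map_add {α β : Type} [BEq α] [LawfulBEq α] [BEq β] [LawfulBEq β]
    {G : α → β} (hG : Function.Injective G) (s : PySem.Set α) (x : α) :
    (PySem.Set.add s x).map G = PySem.Set.add (s.map G) (G x) := by
  have hmem : G x ∈ s.map G ↔ x ∈ s := by
    constructor
    · intro h
      obtain ⟨a, ha, hGa⟩ := List.mem_map.mp h
      rwa [← hG hGa]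
    · intro h; exact List.mem_map.mpr ⟨x, h, rfl⟩
  by_cases h : x ∈ s
  · rw [pv_add_of_mem h, pv_add_of_mem (hmem.mpr h)]
  · have h1 : PySem.Set.add s x = s ++ [x] := by
      unfold PySem.Set.add; rw [if_neg (by simpa using h)]
    have h2 : PySem.Set.add (s.map G) (G x) = s.map G ++ [G x] := by
      unfold PySem.Set.add; rw [if_neg (by simpa using (fun hc => h (hmem.mp hc)))]
    rw [h1, h2, List.map_append]
    rfl

theorem pv_map_foldl {α β : Type} [BEq α] [LawfulBEq α] [BEq β] [LawfulBEq β]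
    {G : α → β} (hG : Function.Injective G) (l : List α) (s : PySem.Set α) :
    (List.foldl PySem.Set.add s l).map G = List.foldl PySem.Set.add (s.map G) (l.map G) := by
  induction l generalizing s with
  | nil => rfl
  | cons x l ih =>
    show (List.foldl PySem.Set.add (PySem.Set.add s x) l).map G = _
    rw [ih (PySem.Set.add s x), pv_map_add hG]
    rfl

theorem pv_map_ofList {α β : Type} [BEq α] [LawfulBEq α] [BEq β] [LawfulBEq β]
    {G : α → β} (hG : Function.Injective G) (l : List α) :
    (PySem.Set.ofList l).map G = PySem.Set.ofList (l.map G) := by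
  rw [PySem.Set.ofList_eq_foldl, PySem.Set.ofList_eq_foldl]
  simpa using pv_map_foldl hG l []

-- ---- the names in question; concrete suffix facts ----

theorem pv_len_in : ("_in.py" : String).toList.length = 6 := by decide
theorem pv_len_op : ("_out.py" : String).toList.length = 7 := by decide
theorem pv_len_ot : ("_out.txt" : String).toList.length = 8 := by decide

theorem pv_in_not_op : ¬ ("_in.py" : String).toList <:+ ("_out.py" : String).toList := by decide
theorem pv_in_not_ot : ¬ ("_in.py" : String).toList <:+ ("_out.txt" : String).toList := by decide
theorem pv_op_not_ot : ¬ ("_out.py" : String).toList <:+ ("_out.txt" : String).toList := by decide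

theorem pvG_inj (dir : String) (fns : List String) : Function.Injective (pvG dir fns) := by
  intro a b h
  exact congrArg (fun t => t.2.1) h

-- ---- base-set membership characterisations ----

theorem pv_mem_opBases {fns : List String} {b : String} :
    b ∈ pvOpBases fns ↔ (b ++ "_out.py") ∈ fns := by
  unfold pvOpBases
  rw [List.mem_filterMap]
  constructor
  · rintro ⟨n, hn, hsome⟩
    by_cases h1 : PySem.Str.endswith n "_in.py" = true
    · rw [if_pos h1] at hsome; simp at hsome
    · by_cases h2 : PySem.Str.endswith n "_out.py" = true
      · rw [if_neg h1, if_pos h2] at hsome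
        have hb := Option.some.inj hsome
        have hn' := pv_strip (ki := -7) (by norm_num) pv_len_op (by norm_num) h2
        rw [hb] at hn'
        rw [hn']
        exact hn
      · rw [if_neg h1, if_neg h2] at hsome; simp at hsome
  · intro h
    refine ⟨b ++ "_out.py", h, ?_⟩
    rw [pv_not_endswith b (by rw [pv_len_in, pv_len_op]; norm_num) pv_in_not_op]
    rw [if_neg (by simp)]
    rw [pv_endswith_append, if_pos rfl]
    rw [pv_base_append b (ki := -7) (by norm_num) pv_len_op (by norm_num)]

theorem pv_mem_otBases {fns : List String} {b : String} :
    b ∈ pvOtBases fns ↔ (b ++ "_out.txt") ∈ fns := by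
  unfold pvOtBases
  rw [List.mem_filterMap]
  constructor
  · rintro ⟨n, hn, hsome⟩
    by_cases h1 : PySem.Str.endswith n "_in.py" = true
    · rw [if_pos h1] at hsome; simp at hsome
    · by_cases h2 : PySem.Str.endswith n "_out.py" = true
      · rw [if_neg h1, if_pos h2] at hsome; simp at hsome
      · by_cases h3 : PySem.Str.endswith n "_out.txt" = true
        · rw [if_neg h1, if_neg h2, if_pos h3] at hsome
          have hb := Option.some.inj hsome
          have hn' := pv_strip (ki := -8) (by norm_num) pv_len_ot (by norm_num) h3
          rw [hb] at hn'
          rw [hn']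
          exact hn
        · rw [if_neg h1, if_neg h2, if_neg h3] at hsome; simp at hsome
  · intro h
    refine ⟨b ++ "_out.txt", h, ?_⟩
    rw [pv_not_endswith b (by rw [pv_len_in, pv_len_ot]; norm_num) pv_in_not_ot]
    rw [if_neg (by simp)]
    rw [pv_not_endswith b (by rw [pv_len_op, pv_len_ot]; norm_num) pv_op_not_ot]
    rw [if_neg (by simp)]
    rw [pv_endswith_append, if_pos rfl]
    rw [pv_base_append b (ki := -8) (by norm_num) pv_len_ot (by norm_num)]

theorem pv_contains_op (fns : List String) (b : String) :
    PySem.Set.contains (PySem.Set.ofList (pvOpBases fns)) b = fns.contains (b ++ "_out.py") := by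
  by_cases h : (b ++ "_out.py") ∈ fns
  · rw [List.contains_iff_mem.mpr h]
    exact (PySem.Set.contains_iff _ _).mpr ((PySem.Set.mem_ofList _ _).mpr (pv_mem_opBases.mpr h))
  · rw [(Bool.not_eq_true _).mp (fun hc => h (List.contains_iff_mem.mp hc))]
    apply (Bool.not_eq_true _).mp
    intro hc
    exact h (pv_mem_opBases.mp ((PySem.Set.mem_ofList _ _).mp ((PySem.Set.contains_iff _ _).mp hc)))

theorem pv_contains_ot (fns : List String) (b : String) :
    PySem.Set.contains (PySem.Set.ofList (pvOtBases fns)) b = fns.contains (b ++ "_out.txt") := by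
  by_cases h : (b ++ "_out.txt") ∈ fns
  · rw [List.contains_iff_mem.mpr h]
    exact (PySem.Set.contains_iff _ _).mpr ((PySem.Set.mem_ofList _ _).mpr (pv_mem_otBases.mpr h))
  · rw [(Bool.not_eq_true _).mp (fun hc => h (List.contains_iff_mem.mp hc))]
    apply (Bool.not_eq_true _).mp
    intro hc
    exact h (pv_mem_otBases.mp ((PySem.Set.mem_ofList _ _).mp ((PySem.Set.contains_iff _ _).mp hc)))

-- ---- A's inner loop as a fold of Set.add over mapped in-bases ----

theorem pv_A_inner (dir : String) (fns : List String) :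
    ∀ (l : List String) (te : PySem.Set (String × String × String × Option String × Option String)),
    List.foldl (fun test_entries name =>
      if PySem.Str.endswith name "_in.py" then
        let base_name := PySem.Str.slice name none (some (-6))
        let in_name := name
        let outpy_name := base_name ++ "_out.py"
        let outtxt_name := base_name ++ "_out.txt"
        let outpy? : Option String := if fns.contains outpy_name then some outpy_name else none
        let outtxt? : Option String := if fns.contains outtxt_name then some outtxt_name else none
        PySem.Set.add test_entries (dir, base_name, in_name, outpy?, outtxt?)
      else test_entries) te l
    = List.foldl PySem.Set.add te ((pvInBases l).map (pvG dir fns)) := by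
  intro l
  induction l with
  | nil => intro te; rfl
  | cons n l ih =>
    intro te
    by_cases h : PySem.Str.endswith n "_in.py" = true
    · have hname : PySem.Str.slice n none (some (-6)) ++ "_in.py" = n :=
        pv_strip (ki := -6) (by norm_num) pv_len_in (by norm_num) h
      show List.foldl _ (if PySem.Str.endswith n "_in.py" = true then _ else te) l = _
      rw [if_pos h]
      rw [ih]
      simp only [pvInBases, List.filterMap_cons, h, reduceIte, List.map_cons, List.foldl_cons]
      unfold pvG
      rw [hname]
    · show List.foldl _ (if PySem.Str.endswith n "_in.py" = true then _ else te) l = _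
      rw [if_neg h, ih]
      simp only [pvInBases, List.filterMap_cons, h, Bool.false_eq_true, reduceIte]

-- ---- B's classification loop componentwise ----

theorem pv_B_class :
    ∀ (l : List String) (acc : PySem.Set String × PySem.Set String × PySem.Set String),
    List.foldl (fun (acc : PySem.Set String × PySem.Set String × PySem.Set String) name =>
        if PySem.Str.endswith name "_in.py" then
          (PySem.Set.add acc.1 (PySem.Str.slice name none (some (-6))), acc.2.1, acc.2.2)
        else if PySem.Str.endswith name "_out.py" then
          (acc.1, PySem.Set.add acc.2.1 (PySem.Str.slice name none (some (-7))), acc.2.2)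
        else if PySem.Str.endswith name "_out.txt" then
          (acc.1, acc.2.1, PySem.Set.add acc.2.2 (PySem.Str.slice name none (some (-8))))
        else acc) acc l
    = (List.foldl PySem.Set.add acc.1 (pvInBases l),
       List.foldl PySem.Set.add acc.2.1 (pvOpBases l),
       List.foldl PySem.Set.add acc.2.2 (pvOtBases l)) := by
  intro l
  induction l with
  | nil => intro acc; rfl
  | cons n l ih =>
    intro acc
    unfold pvInBases pvOpBases pvOtBases
    rw [List.foldl_cons, ih, List.filterMap_cons, List.filterMap_cons, List.filterMap_cons]
    by_cases h1 : PySem.Str.endswith n "_in.py" = true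
    · simp only [h1, reduceIte, List.foldl_cons]; rfl
    · by_cases h2 : PySem.Str.endswith n "_out.py" = true
      · simp only [h1, h2, Bool.false_eq_true, reduceIte, List.foldl_cons]; rfl
      · by_cases h3 : PySem.Str.endswith n "_out.txt" = true
        · simp only [h1, h2, h3, Bool.false_eq_true, reduceIte, List.foldl_cons]; rfl
        · simp only [h1, h2, h3, Bool.false_eq_true, reduceIte]; rfl

-- ---- per-directory-pair equality ----

theorem pv_pair_eq (dir : String) (fns : List String)
    (te : PySem.Set (String × String × String × Option String × Option String)) :
    List.foldl (fun test_entries name =>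
      if PySem.Str.endswith name "_in.py" then
        let base_name := PySem.Str.slice name none (some (-6))
        let in_name := name
        let outpy_name := base_name ++ "_out.py"
        let outtxt_name := base_name ++ "_out.txt"
        let outpy? : Option String := if fns.contains outpy_name then some outpy_name else none
        let outtxt? : Option String := if fns.contains outtxt_name then some outtxt_name else none
        PySem.Set.add test_entries (dir, base_name, in_name, outpy?, outtxt?)
      else test_entries) te fns
    = (let c := fns.foldl
        (fun (acc : PySem.Set String × PySem.Set String × PySem.Set String) name =>
          if PySem.Str.endswith name "_in.py" then
            (PySem.Set.add acc.1 (PySem.Str.slice name none (some (-6))), acc.2.1, acc.2.2)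
          else if PySem.Str.endswith name "_out.py" then
            (acc.1, PySem.Set.add acc.2.1 (PySem.Str.slice name none (some (-7))), acc.2.2)
          else if PySem.Str.endswith name "_out.txt" then
            (acc.1, acc.2.1, PySem.Set.add acc.2.2 (PySem.Str.slice name none (some (-8))))
          else acc)
        (PySem.Set.empty, PySem.Set.empty, PySem.Set.empty)
       c.1.foldl (fun result base =>
        PySem.Set.add result (dir, base, base ++ "_in.py",
          if PySem.Set.contains c.2.1 base then some (base ++ "_out.py") else none,
          if PySem.Set.contains c.2.2 base then some (base ++ "_out.txt") else none)) te) := by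
  rw [pv_A_inner dir fns fns te]
  rw [pv_B_class fns (PySem.Set.empty, PySem.Set.empty, PySem.Set.empty)]
  show List.foldl PySem.Set.add te ((pvInBases fns).map (pvG dir fns))
    = List.foldl (fun result base => PySem.Set.add result _) te
        (List.foldl PySem.Set.add PySem.Set.empty (pvInBases fns))
  have hof : ∀ (l : List String),
      List.foldl PySem.Set.add (PySem.Set.empty : PySem.Set String) l = PySem.Set.ofList l := by
    intro l; rw [PySem.Set.ofList_eq_foldl]; rfl
  rw [hof]
  have hstep : (fun (result : PySem.Set (String × String × String × Option String × Option String)) base =>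
      PySem.Set.add result (dir, base, base ++ "_in.py",
        if PySem.Set.contains (List.foldl PySem.Set.add PySem.Set.empty (pvOpBases fns)) base
          then some (base ++ "_out.py") else none,
        if PySem.Set.contains (List.foldl PySem.Set.add PySem.Set.empty (pvOtBases fns)) base
          then some (base ++ "_out.txt") else none))
      = (fun result base => PySem.Set.add result (pvG dir fns base)) := by
    funext result base
    rw [hof, hof, pv_contains_op, pv_contains_ot]
    rfl
  rw [hstep]
  rw [show (fun result base => PySem.Set.add result (pvG dir fns base))
      = (fun (result : PySem.Set _) (base : String) => PySem.Set.add result (pvG dir fns base)) from rfl]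
  rw [← List.foldl_map (f := pvG dir fns) (g := PySem.Set.add)]
  rw [pv_map_ofList (pvG_inj dir fns)]
  rw [pv_foldl_ofList]

-- ===== VERDICT (by name: the statement is the Claim_ definition above) =====
theorem get_test_entries_spec : Claim_equal_get_test_entries := by
  intro dirfiles hD
  clear hD
  unfold Spec_get_test_entries get_test_entries get_test_entries_alt
  induction dirfiles using List.reverseRecOn with
  | nil => rfl
  | append_singleton l df ih =>
    rw [List.foldl_append, List.foldl_append, ih]
    simp only [List.foldl_cons, List.foldl_nil]
    exact pv_pair_eq df.1 df.2 _
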